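-- pv_equiv track=rewrite | github.com/coval-ai/benchmarks | runner/src/coval_bench/metrics/wer.py | _dehyphenate
-- ===== SOURCE A (Python) =====
-- def _dehyphenate(text: str) -> str:
--     """Replace hyphens between alphanumeric characters with spaces."""
--     words = text.split()
--     result: list[str] = []
--     for word in words:
--         dehyphenated = ""
--         for i, ch in enumerate(word):
--             if (
--                 0 < i < len(word) - 1
--                 and ch == "-"
--                 and word[i - 1].isalnum()
--                 and word[i + 1].isalnum()
--             ):
--                 dehyphenated += " "
--             else:
--                 dehyphenated += ch
--         result.append(dehyphenated)
--     return " ".join(result)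
-- ===== SOURCE B (Python) =====
-- def _dehyphenate(text: str) -> str:
--     """Replace hyphens between alphanumeric characters with spaces."""
--     transformed = [
--         " " if cur == "-" and prev.isalnum() and nxt.isalnum() else cur
--         for prev, cur, nxt in zip(" " + text, text, text[1:] + " ")
--     ]
--     return " ".join("".join(transformed).split())
-- ===== Notes on version B (the rewrite author's own statement) =====
-- stated objective: simpler
-- what changed: A splits the text into words and runs a nested index-based loop per word; B does one flat pass over (prev, cur, next) character triples of the whole text (via zip with shifted copies) and then normalises whitespace once with split/join.
import Mathlib
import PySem

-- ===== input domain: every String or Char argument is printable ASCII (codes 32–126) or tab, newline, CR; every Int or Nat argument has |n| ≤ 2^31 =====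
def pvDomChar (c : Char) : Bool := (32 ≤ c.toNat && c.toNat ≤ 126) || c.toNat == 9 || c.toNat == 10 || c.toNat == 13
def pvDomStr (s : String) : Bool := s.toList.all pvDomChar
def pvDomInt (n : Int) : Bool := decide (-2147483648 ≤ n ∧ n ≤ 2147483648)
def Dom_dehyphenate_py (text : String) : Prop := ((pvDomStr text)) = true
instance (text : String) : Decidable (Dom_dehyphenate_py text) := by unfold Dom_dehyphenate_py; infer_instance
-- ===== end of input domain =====

-- B replaces A's split-then-per-word nested loop by one whole-text pass over (prev, cur, next)
-- character triples followed by a single split/join whitespace normalisation (objective: simpler).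
-- Both ports work on the code-point list text.toList (the PySem string primitives are defined there).

-- ===== PORT A =====
-- the inner `for i, ch in enumerate(word)` loop of A, building `dehyphenated` by appending
def dehWordA (word : List Char) : List Char :=
  (PySem.List.enumerate word).foldl
    (fun acc p =>
      if 0 < p.1 ∧ p.1 < (word.length : Int) - 1 ∧ p.2 = '-' ∧
         PySem.Chars.isalnum (PySem.List.pyGetD word (p.1 - 1) ' ') = true ∧
         PySem.Chars.isalnum (PySem.List.pyGetD word (p.1 + 1) ' ') = true
      then acc ++ [' '] else acc ++ [p.2]) []

def dehyphenate_py (text : String) : String :=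
  -- words = text.split(); for word in words: result.append(dehyphenated); return " ".join(result)
  String.ofList (PySem.Chars.join [' ']
    ((PySem.Chars.split₀ text.toList).foldl (fun res w => res ++ [dehWordA w]) []))

-- ===== PORT B =====
-- the list comprehension over zip(" " + text, text, text[1:] + " ")
def dehCharsB (cs : List Char) : List Char :=
  (((' ' :: cs).zip cs).zip (PySem.Chars.slice cs (some 1) none ++ [' '])).map
    (fun t =>
      if t.1.2 = '-' ∧ PySem.Chars.isalnum t.1.1 = true ∧ PySem.Chars.isalnum t.2 = true
      then ' ' else t.1.2)

def dehyphenate_py_alt (text : String) : String :=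
  -- " ".join("".join(transformed).split())
  String.ofList (PySem.Chars.join [' '] (PySem.Chars.split₀ (dehCharsB text.toList)))

-- ===== PRECONDITION & SPEC =====
def Spec_dehyphenate_py (text : String) (out : String) : Prop := out = dehyphenate_py_alt text
instance (text : String) (out : String) : Decidable (Spec_dehyphenate_py text out) := by unfold Spec_dehyphenate_py; infer_instance

-- ===== CLAIM (what is proved, stated in full; the proofs are below) =====
def Claim_equal_dehyphenate_py : Prop := ∀ (text : String), Dom_dehyphenate_py text → Spec_dehyphenate_py text (dehyphenate_py text)

-- ===== LEMMAS AND PROOFS =====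

-- `rep p c n`: what one character `c` becomes, given its neighbours `p` and `n`
def rep (p c n : Char) : Char :=
  if c = '-' ∧ PySem.Chars.isalnum p = true ∧ PySem.Chars.isalnum n = true then ' ' else c

-- the hyphen transform as a structural recursion carrying the previous character
def gRec (p : Char) : List Char → List Char
  | [] => []
  | [c] => [rep p c ' ']
  | c :: d :: t => rep p c d :: gRec c (d :: t)

-- Python's whitespace split as a plain structural recursion (proved equal to split₀ below)
def mySplit : List Char → List (List Char)
  | [] => []
  | c :: r =>
    if PySem.Chars.isspace c then mySplit r
    else (c :: r.takeWhile (fun d => !PySem.Chars.isspace d)) ::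
         mySplit (r.dropWhile (fun d => !PySem.Chars.isspace d))
  termination_by l => l.length
  decreasing_by
    · simp
    · simp only [List.length_cons]
      exact Nat.lt_succ_of_le (List.length_dropWhile_le _ _)

def wordlist (ws : List (List Char)) : Prop :=
  ∀ u ∈ ws, u ≠ [] ∧ ∀ c ∈ u, PySem.Chars.isspace c = false

-- character-class facts
lemma space_not_alnum (c : Char) (h : PySem.Chars.isspace c = true) :
    PySem.Chars.isalnum c = false := by
  simp only [PySem.Chars.isspace, PySem.Chars.isalnum, PySem.Chars.isalpha, PySem.Chars.isdigit,
    PySem.Chars.isupper, PySem.Chars.islower, Char.le_def, Char.toNat] at *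
  simp_all [Bool.or_eq_true, Bool.and_eq_true, decide_eq_true_eq, UInt32.le_iff_toNat_le]
  omega

lemma space_ne_hyphen (c : Char) (h : PySem.Chars.isspace c = true) : c ≠ '-' := by
  rintro rfl; simp [PySem.Chars.isspace] at h

lemma alnum_ne_hyphen (c : Char) (h : PySem.Chars.isalnum c = true) : c ≠ '-' := by
  rintro rfl
  simp [PySem.Chars.isalnum, PySem.Chars.isalpha, PySem.Chars.isdigit,
    PySem.Chars.isupper, PySem.Chars.islower, Char.le_def] at h

lemma rep_keep (p c n : Char) (h : c ≠ '-') : rep p c n = c := by simp [rep, h]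

lemma rep_keep_of_next (p c n : Char) (h : PySem.Chars.isalnum n = false) : rep p c n = c := by
  simp [rep, h]

lemma rep_keep_of_prev (p c n : Char) (h : PySem.Chars.isalnum p = false) : rep p c n = c := by
  simp [rep, h]

lemma gRec_length (p : Char) (w : List Char) : (gRec p w).length = w.length := by
  fun_induction gRec <;> simp_all

lemma gRec_congr (p q : Char) (w : List Char) (hp : PySem.Chars.isalnum p = false)
    (hq : PySem.Chars.isalnum q = false) : gRec p w = gRec q w := by
  match w with
  | [] => rfl
  | [c] => simp [gRec, rep, hp, hq]
  | c :: d :: t => simp [gRec, rep, hp, hq]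

lemma gRec_cons_keep (p c : Char) (r : List Char) (h : c ≠ '-') :
    gRec p (c :: r) = c :: gRec c r := by
  match r with
  | [] => simp [gRec, rep, h]
  | d :: t => simp [gRec, rep, h]

lemma gRec_append_sep (s : Char) (hs : PySem.Chars.isalnum s = false) (hs2 : s ≠ '-')
    (u : List Char) (p : Char) (v : List Char) :
    gRec p (u ++ s :: v) = gRec p u ++ s :: gRec s v := by
  induction u generalizing p with
  | nil => simpa [gRec] using gRec_cons_keep p s v hs2
  | cons a u2 ih =>
    match u2 with
    | [] =>
      have h1 : gRec p ([a] ++ s :: v) = rep p a s :: gRec a (s :: v) := by simp [gRec]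
      rw [h1, gRec_cons_keep _ _ _ hs2, rep_keep_of_next _ _ _ hs]
      simp [gRec, rep_keep_of_next _ _ _ (by decide : PySem.Chars.isalnum ' ' = false)]
    | b :: u3 =>
      have h1 : gRec p ((a :: b :: u3) ++ s :: v) = rep p a b :: gRec a ((b :: u3) ++ s :: v) := by
        simp [gRec]
      rw [h1, ih]
      simp [gRec]

lemma dropWhile_head_false {α : Type} (p : α → Bool) (l : List α) (x : α) (xs : List α)
    (h : l.dropWhile p = x :: xs) : p x = false := by
  induction l with
  | nil => simp at h
  | cons a l2 ih =>
    rw [List.dropWhile_cons] at h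
    by_cases hp : p a
    · rw [if_pos hp] at h; exact ih h
    · rw [if_neg hp] at h
      rcases (List.cons.injEq _ _ _ _).mp h with ⟨rfl, _⟩
      exact Bool.not_eq_true _ |>.mp hp

-- split₀ computes mySplit
lemma split₀_go_spec (s cur : List Char) (acc : List (List Char)) :
    PySem.Chars.split₀.go s cur acc
      = acc.reverse ++ (if cur = [] then mySplit s
          else (cur.reverse ++ s.takeWhile (fun d => !PySem.Chars.isspace d)) ::
               mySplit (s.dropWhile (fun d => !PySem.Chars.isspace d))) := by
  induction s generalizing cur acc with
  | nil =>
    by_cases h : cur = [] <;>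
      simp [PySem.Chars.split₀.go, h, mySplit]
  | cons c rest ih =>
    by_cases hc : PySem.Chars.isspace c
    · by_cases h : cur = [] <;>
        simp [PySem.Chars.split₀.go, hc, h, ih, mySplit]
    · by_cases h : cur = [] <;>
        simp [PySem.Chars.split₀.go, hc, h, ih, mySplit]

lemma split₀_eq_mySplit (cs : List Char) : PySem.Chars.split₀ cs = mySplit cs := by
  simpa using split₀_go_spec cs [] []

lemma mySplit_append_sep (s : Char) (hs : PySem.Chars.isspace s = true) (x y : List Char) :
    mySplit (x ++ s :: y) = mySplit x ++ mySplit y := by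
  induction x using mySplit.induct with
  | case1 => simp [mySplit, hs]
  | case2 c r hc ih => simpa [mySplit, hc] using ih
  | case3 c r hc ih =>
    rw [List.cons_append, mySplit, mySplit, if_neg hc, if_neg hc]
    by_cases hall : ∀ d ∈ r, (fun d => !PySem.Chars.isspace d) d = true
    · have htk : r.takeWhile (fun d => !PySem.Chars.isspace d) = r :=
        List.takeWhile_eq_self_iff.mpr hall
      have hdp : r.dropWhile (fun d => !PySem.Chars.isspace d) = [] :=
        List.dropWhile_eq_nil_iff.mpr hall
      rw [List.takeWhile_append, List.dropWhile_append]
      simp [htk, hdp, hs, mySplit]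
    · have htk : ¬ ((r.takeWhile (fun d => !PySem.Chars.isspace d)).length = r.length) := by
        intro hlen
        exact hall (List.takeWhile_eq_self_iff.mp
          ((List.takeWhile_prefix _).eq_of_length hlen))
      have hdp : ¬ ((r.dropWhile (fun d => !PySem.Chars.isspace d)).isEmpty = true) := by
        simp only [List.isEmpty_iff, List.dropWhile_eq_nil_iff]
        exact hall
      rw [List.takeWhile_append, List.dropWhile_append, if_neg htk, if_neg hdp, ih]
      simp

lemma mySplit_word (w : List Char) (h0 : w ≠ []) (h : ∀ c ∈ w, PySem.Chars.isspace c = false) :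
    mySplit w = [w] := by
  match w with
  | c :: r =>
    rw [mySplit, if_neg (by simp [h c (by simp)])]
    have htk : r.takeWhile (fun d => !PySem.Chars.isspace d) = r :=
      List.takeWhile_eq_self_iff.mpr (by intro x hx; simp [h x (by simp [hx])])
    have hdp : r.dropWhile (fun d => !PySem.Chars.isspace d) = [] :=
      List.dropWhile_eq_nil_iff.mpr (by intro x hx; simp [h x (by simp [hx])])
    rw [htk, hdp, mySplit]

lemma mem_mySplit_ne_nil (z : List Char) (u : List Char) (h : u ∈ mySplit z) : u ≠ [] := by
  induction z using mySplit.induct with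
  | case1 => simp [mySplit] at h
  | case2 c r hc ih => rw [mySplit, if_pos hc] at h; exact ih h
  | case3 c r hc ih =>
    rw [mySplit, if_neg hc] at h
    rcases List.mem_cons.mp h with h1 | h2
    · simp [h1]
    · exact ih h2

lemma join_cons_ne (sep a : List Char) (l : List (List Char)) (h : l ≠ []) :
    PySem.Chars.join sep (a :: l) = a ++ sep ++ PySem.Chars.join sep l := by
  match l with
  | b :: l2 => exact PySem.Chars.join_cons_cons sep a b l2

lemma join_cons_head (c : Char) (u : List Char) (ws2 : List (List Char)) :
    PySem.Chars.join [' '] ((c :: u) :: ws2) = c :: PySem.Chars.join [' '] (u :: ws2) := by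
  match ws2 with
  | [] => simp [PySem.Chars.join_singleton]
  | v :: ws3 => simp [PySem.Chars.join_cons_cons]

lemma mySplit_join (ws : List (List Char)) (h : wordlist ws) :
    mySplit (PySem.Chars.join [' '] ws) = ws := by
  induction ws with
  | nil => rw [PySem.Chars.join_nil, mySplit]
  | cons w ws2 ih =>
    match ws2 with
    | [] =>
      rw [PySem.Chars.join_singleton]
      exact mySplit_word w (h w (by simp)).1 (h w (by simp)).2
    | v :: ws3 =>
      rw [PySem.Chars.join_cons_cons]
      have : w ++ [' '] ++ PySem.Chars.join [' '] (v :: ws3)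
          = w ++ ' ' :: PySem.Chars.join [' '] (v :: ws3) := by simp
      rw [this, mySplit_append_sep ' ' (by decide),
        mySplit_word w (h w (by simp)).1 (h w (by simp)).2,
        ih (fun u hu => h u (by simp [hu]))]
      rfl

lemma join_append_split (A1 A2 : List (List Char)) (h : A1 ≠ []) :
    PySem.Chars.join [' '] (A1 ++ A2)
      = PySem.Chars.join [' '] A1 ++ (if A2 = [] then [] else ' ' :: PySem.Chars.join [' '] A2) := by
  induction A1 with
  | nil => simp at h
  | cons a l ih =>
    match l with
    | [] =>
      match A2 with
      | [] => simp [PySem.Chars.join_singleton]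
      | b :: A2' => simp [PySem.Chars.join_singleton, PySem.Chars.join_cons_cons]
    | b :: l2 =>
      rw [List.cons_append, join_cons_ne _ _ _ (by simp), join_cons_ne _ _ _ (by simp),
        ih (by simp)]
      simp

lemma join_ne_nil (l : List (List Char)) (h0 : l ≠ []) (h : ∀ u ∈ l, u ≠ []) :
    PySem.Chars.join [' '] l ≠ [] := by
  match l with
  | u :: l2 =>
    match l2 with
    | [] => rw [PySem.Chars.join_singleton]; exact h u (by simp)
    | v :: l3 =>
      rw [PySem.Chars.join_cons_cons]
      have := h u (by simp)
      intro hcontra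
      simp_all

-- a transformed word decomposes into space-separated non-space chunks
lemma gRec_decomp (w : List Char) (p : Char) (h0 : w ≠ [])
    (h : ∀ c ∈ w, PySem.Chars.isspace c = false) :
    ∃ ws, ws ≠ [] ∧ wordlist ws ∧
      (gRec p w = PySem.Chars.join [' '] ws ∨ gRec p w = ' ' :: PySem.Chars.join [' '] ws) := by
  induction w generalizing p with
  | nil => exact absurd rfl h0
  | cons c w2 ih =>
    cases w2 with
    | nil =>
      refine ⟨[[c]], by simp, ?_, Or.inl ?_⟩
      · intro u hu
        rcases List.mem_singleton.mp hu with rfl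
        exact ⟨by simp, fun y hy => h y (by simpa using hy)⟩
      · rw [PySem.Chars.join_singleton]
        show [rep p c ' '] = [c]
        rw [rep_keep_of_next _ _ _ (by decide)]
    | cons d t =>
      obtain ⟨ws0, hws0, hwsl0, hdisj⟩ := ih c (by simp) (fun x hx => h x (by simp at hx ⊢; tauto))
      have hgw : gRec p (c :: d :: t) = rep p c d :: gRec c (d :: t) := rfl
      have hd_ns : PySem.Chars.isspace d = false := h d (by simp)
      by_cases hcond : c = '-' ∧ PySem.Chars.isalnum p = true ∧ PySem.Chars.isalnum d = true
      · -- head replaced by ' '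
        have hrep : rep p c d = ' ' := by simp [rep, hcond]
        have hd_nh : d ≠ '-' := alnum_ne_hyphen d hcond.2.2
        have hhead : ∃ tl, gRec c (d :: t) = d :: tl := by
          match t with
          | [] => exact ⟨[], by show [rep c d ' '] = _; rw [rep_keep _ _ _ hd_nh]⟩
          | e :: t2 => exact ⟨_, by show rep c d e :: _ = _; rw [rep_keep _ _ _ hd_nh]⟩
        obtain ⟨tl, htl⟩ := hhead
        rcases hdisj with hL | hR
        · exact ⟨ws0, hws0, hwsl0, Or.inr (by rw [hgw, hrep, hL])⟩
        · exfalso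
          rw [htl] at hR
          have : d = ' ' := (List.cons.injEq _ _ _ _).mp hR |>.1
          rw [this] at hd_ns
          exact absurd hd_ns (by decide)
      · -- head kept
        have hrep : rep p c d = c := by simp [rep]; intro h1 h2 h3; exact absurd ⟨h1, h2, h3⟩ hcond
        rcases hdisj with hL | hR
        · match ws0, hws0 with
          | u :: ws2, _ =>
            refine ⟨(c :: u) :: ws2, by simp, ?_, Or.inl ?_⟩
            · intro x hx
              rcases List.mem_cons.mp hx with rfl | hx2
              · refine ⟨by simp, ?_⟩
                intro y hy
                rcases List.mem_cons.mp hy with rfl | hy2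
                · exact h y (by simp)
                · exact (hwsl0 u (by simp)).2 y hy2
              · exact hwsl0 x (by simp [hx2])
            · rw [join_cons_head, hgw, hrep, hL]
        · refine ⟨[c] :: ws0, by simp, ?_, Or.inl ?_⟩
          · intro x hx
            rcases List.mem_cons.mp hx with rfl | hx2
            · exact ⟨by simp, fun y hy => h y (by simp [List.mem_singleton.mp hy])⟩
            · exact hwsl0 x hx2
          · rw [join_cons_ne _ _ _ hws0, hgw, hrep, hR]
            simp

lemma gRec_decomp' (w : List Char) (p : Char) (hp : PySem.Chars.isalnum p = false) (h0 : w ≠ [])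
    (h : ∀ c ∈ w, PySem.Chars.isspace c = false) :
    ∃ ws, ws ≠ [] ∧ wordlist ws ∧ gRec p w = PySem.Chars.join [' '] ws := by
  obtain ⟨ws, hws0, hwsl, hdisj⟩ := gRec_decomp w p h0 h
  refine ⟨ws, hws0, hwsl, ?_⟩
  rcases hdisj with hL | hR
  · exact hL
  · exfalso
    have hhead : ∃ c tl, gRec p w = c :: tl ∧ PySem.Chars.isspace c = false := by
      match w, h0 with
      | [c], _ =>
        exact ⟨c, [], by show [rep p c ' '] = _; rw [rep_keep_of_prev _ _ _ hp], h c (by simp)⟩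
      | c :: d :: t, _ =>
        exact ⟨c, _, by show rep p c d :: _ = _; rw [rep_keep_of_prev _ _ _ hp], h c (by simp)⟩
    obtain ⟨c, tl, hctl, hcs⟩ := hhead
    rw [hctl] at hR
    have : c = ' ' := (List.cons.injEq _ _ _ _).mp hR |>.1
    rw [this] at hcs
    exact absurd hcs (by decide)

-- the core: transforming word-by-word then joining = transforming the whole text then renormalising
lemma core (cs : List Char) :
    PySem.Chars.join [' '] ((mySplit cs).map (gRec ' '))
      = PySem.Chars.join [' '] (mySplit (gRec ' ' cs)) := by
  induction cs using mySplit.induct with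
  | case1 =>
    have h1 : gRec ' ' ([] : List Char) = [] := rfl
    have h2 : mySplit ([] : List Char) = [] := by rw [mySplit]
    simp [h1, h2]
  | case2 c r hc ih =>
    have hch : c ≠ '-' := space_ne_hyphen c hc
    have hca : PySem.Chars.isalnum c = false := space_not_alnum c hc
    rw [mySplit, if_pos hc, gRec_cons_keep _ _ _ hch,
      gRec_congr c ' ' r hca (by decide), mySplit, if_pos hc]
    exact ih
  | case3 c r hc ih =>
    have hc' : PySem.Chars.isspace c = false := by simpa using hc
    have hsplit : mySplit (c :: r) =
        (c :: r.takeWhile (fun d => !PySem.Chars.isspace d)) ::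
        mySplit (r.dropWhile (fun d => !PySem.Chars.isspace d)) := by
      rw [mySplit, if_neg hc]
    set tk := r.takeWhile (fun d => !PySem.Chars.isspace d) with htk
    set dp := r.dropWhile (fun d => !PySem.Chars.isspace d) with hdp
    have hw0 : (c :: tk) ≠ [] := by simp
    have hwns : ∀ x ∈ c :: tk, PySem.Chars.isspace x = false := by
      intro x hx
      rcases List.mem_cons.mp hx with rfl | hx2
      · exact hc'
      · simpa using List.mem_takeWhile_imp hx2
    obtain ⟨ws, hws0, hwsl, hgw⟩ := gRec_decomp' (c :: tk) ' ' (by decide) hw0 hwns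
    have hcr : c :: r = (c :: tk) ++ dp := by
      rw [htk, hdp]
      simp [List.takeWhile_append_dropWhile]
    cases hdpe : dp with
    | nil =>
      have hr : c :: r = c :: tk := by rw [hcr, hdpe, List.append_nil]
      have hnil : mySplit ([] : List Char) = [] := by rw [mySplit]
      rw [hsplit, hdpe, hnil]
      simp only [List.map_cons, List.map_nil]
      rw [PySem.Chars.join_singleton, hr, hgw, mySplit_join ws hwsl, ← hgw]
    | cons s dp2 =>
      have hs : PySem.Chars.isspace s = true := by
        have := dropWhile_head_false (fun d => !PySem.Chars.isspace d) r s dp2 (by rw [← hdp, hdpe])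
        simpa using this
      have hsa : PySem.Chars.isalnum s = false := space_not_alnum s hs
      have hsh : s ≠ '-' := space_ne_hyphen s hs
      have hrhs : mySplit (gRec ' ' (c :: r)) = ws ++ mySplit (gRec s dp2) := by
        rw [hcr, hdpe, gRec_append_sep s hsa hsh, mySplit_append_sep s hs, hgw,
          mySplit_join ws hwsl]
      have hdp_split : mySplit (gRec ' ' dp) = mySplit (gRec s dp2) := by
        rw [hdpe, gRec_cons_keep _ _ _ hsh, gRec_congr s ' ' dp2 hsa (by decide),
          gRec_congr ' ' s dp2 (by decide) hsa, mySplit, if_pos hs]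
      have hjoin_eq : PySem.Chars.join [' '] ((mySplit dp).map (gRec ' '))
          = PySem.Chars.join [' '] (mySplit (gRec s dp2)) := by
        rw [ih, hdp_split]
      set L := (mySplit dp).map (gRec ' ') with hL
      set A2 := mySplit (gRec s dp2) with hA2
      have hLmem : ∀ u ∈ L, u ≠ [] := by
        intro u hu
        obtain ⟨v, hv, rfl⟩ := List.mem_map.mp hu
        have hvne : v ≠ [] := mem_mySplit_ne_nil _ v hv
        intro hnil
        exact hvne (List.length_eq_zero_iff.mp (by rw [← gRec_length ' ' v, hnil]; rfl))
      have hA2mem : ∀ u ∈ A2, u ≠ [] := fun u hu => mem_mySplit_ne_nil _ u hu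
      have hiff : L = [] ↔ A2 = [] := by
        constructor
        · intro hLnil
          by_contra hA2nil
          exact join_ne_nil A2 hA2nil hA2mem (by rw [← hjoin_eq, hLnil, PySem.Chars.join_nil])
        · intro hA2nil
          by_contra hLnil
          exact join_ne_nil L hLnil hLmem (by rw [hjoin_eq, hA2nil, PySem.Chars.join_nil])
      rw [hsplit, hrhs, join_append_split ws A2 hws0, ← hgw]
      show PySem.Chars.join [' '] (gRec ' ' (c :: tk) :: L) = _
      cases hLe : L with
      | nil =>
        rw [PySem.Chars.join_singleton, if_pos (hiff.mp hLe), List.append_nil]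
      | cons l0 L2 =>
        have hA2ne : A2 ≠ [] := by
          intro hnil
          rw [hiff.mpr hnil] at hLe
          simp at hLe
        rw [join_cons_ne _ _ _ (by simp), if_neg hA2ne, ← hjoin_eq, hLe]
        simp

-- index-wise description of gRec
lemma gRec_getElem (w : List Char) (p : Char) (k : Nat) (hk : k < w.length)
    (hk' : k < (gRec p w).length) :
    (gRec p w)[k] = rep (if k = 0 then p else w.getD (k - 1) ' ') (w[k]) (w.getD (k + 1) ' ') := by
  induction w generalizing p k with
  | nil => simp at hk
  | cons c w2 ih =>
    cases w2 with
    | nil =>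
      have hk0 : k = 0 := by simpa using hk
      subst hk0
      simp [gRec]
    | cons d t =>
      cases k with
      | zero => simp [gRec]
      | succ j =>
        have h1 : (gRec p (c :: d :: t))[j + 1] = (gRec c (d :: t))[j]'(by
            rw [gRec_length]; simpa using hk) := by
          show (rep p c d :: gRec c (d :: t))[j + 1] = _
          simp
        rw [h1, ih c j (by simpa using hk)]
        cases j <;> simp

-- port A's word loop computes gRec ' '
lemma dehWordA_eq (w : List Char) : dehWordA w = gRec ' ' w := by
  have hbody : dehWordA w = (PySem.List.enumerate w).map
      (fun p =>
        if 0 < p.1 ∧ p.1 < (w.length : Int) - 1 ∧ p.2 = '-' ∧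
           PySem.Chars.isalnum (PySem.List.pyGetD w (p.1 - 1) ' ') = true ∧
           PySem.Chars.isalnum (PySem.List.pyGetD w (p.1 + 1) ' ') = true
        then ' ' else p.2) := by
    rw [dehWordA]
    have : ∀ (acc : List Char) (p : Int × Char),
        (if 0 < p.1 ∧ p.1 < (w.length : Int) - 1 ∧ p.2 = '-' ∧
            PySem.Chars.isalnum (PySem.List.pyGetD w (p.1 - 1) ' ') = true ∧
            PySem.Chars.isalnum (PySem.List.pyGetD w (p.1 + 1) ' ') = true
         then acc ++ [' '] else acc ++ [p.2])
        = acc ++ [if 0 < p.1 ∧ p.1 < (w.length : Int) - 1 ∧ p.2 = '-' ∧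
            PySem.Chars.isalnum (PySem.List.pyGetD w (p.1 - 1) ' ') = true ∧
            PySem.Chars.isalnum (PySem.List.pyGetD w (p.1 + 1) ' ') = true
         then ' ' else p.2] := by
      intro acc p
      split <;> rfl
    simp only [this]
    rw [PySem.List.foldl_append_singleton_eq_map, List.nil_append]
  rw [hbody]
  apply List.ext_getElem
  · rw [List.length_map, PySem.List.length_enumerate, gRec_length]
  · intro k hk1 hk2
    rw [List.getElem_map, PySem.List.getElem_enumerate,
      gRec_getElem w ' ' k (by simpa [PySem.List.length_enumerate] using hk1) hk2]
    have hklen : k < w.length := by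
      simpa [PySem.List.length_enumerate] using hk1
    simp only [zero_add]
    by_cases hmid : 0 < k ∧ k + 1 < w.length
    · -- interior position: both lookups are real neighbours
      have hprev : PySem.List.pyGetD w ((k : Int) - 1) ' ' = w.getD (k - 1) ' ' := by
        rw [PySem.List.pyGetD_of_nonneg _ _ (by omega)]
        congr 1
        omega
      have hnext : PySem.List.pyGetD w ((k : Int) + 1) ' ' = w.getD (k + 1) ' ' := by
        rw [PySem.List.pyGetD_of_nonneg _ _ (by omega)]
        congr 1
      rw [rep, hprev, hnext, if_neg (by omega : ¬ k = 0)]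
      have hiff : (0 < (k : Int) ∧ (k : Int) < (w.length : Int) - 1 ∧ w[k] = '-' ∧
            PySem.Chars.isalnum (w.getD (k - 1) ' ') = true ∧
            PySem.Chars.isalnum (w.getD (k + 1) ' ') = true)
          ↔ (w[k] = '-' ∧ PySem.Chars.isalnum (w.getD (k - 1) ' ') = true ∧
            PySem.Chars.isalnum (w.getD (k + 1) ' ') = true) := by
        constructor
        · rintro ⟨_, _, h3, h4, h5⟩; exact ⟨h3, h4, h5⟩
        · rintro ⟨h3, h4, h5⟩
          exact ⟨by exact_mod_cast hmid.1, by omega, h3, h4, h5⟩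
      simp only [hiff]
    · -- boundary: condition is false on both sides
      have hsp : PySem.Chars.isalnum ' ' = false := by decide
      rw [if_neg (by omega)]
      rcases Nat.lt_or_ge 0 k with hk0 | hk0
      · -- k+1 = w.length: the `next` lookup is the ' ' default
        have hnext : w.getD (k + 1) ' ' = ' ' := by
          rw [List.getD_eq_getElem?_getD, List.getElem?_eq_none (by omega)]
          rfl
        rw [rep, hnext, if_neg (by simp [hsp])]
      · -- k = 0
        have hk0' : k = 0 := by omega
        subst hk0'
        rw [rep, if_pos rfl, if_neg (by simp [hsp])]

-- port B's zip-comprehension computes gRec ' '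
lemma zipg_eq (cs : List Char) (p : Char) :
    (((p :: cs).zip cs).zip (cs.drop 1 ++ [' '])).map
      (fun t =>
        if t.1.2 = '-' ∧ PySem.Chars.isalnum t.1.1 = true ∧ PySem.Chars.isalnum t.2 = true
        then ' ' else t.1.2) = gRec p cs := by
  induction cs generalizing p with
  | nil => rfl
  | cons c rest ih =>
    cases rest with
    | nil => simp [gRec, rep]
    | cons d t =>
      have h1 : (p :: c :: d :: t).zip (c :: d :: t) = (p, c) :: (c :: d :: t).zip (d :: t) := rfl
      have h2 : (c :: d :: t).drop 1 ++ [' '] = d :: (t ++ [' ']) := rfl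
      have h3 : (d :: t).drop 1 ++ [' '] = t ++ [' '] := rfl
      rw [h1, h2, List.zip_cons_cons, List.map_cons]
      show _ :: _ = rep p c d :: gRec c (d :: t)
      rw [← ih c, h3]
      rfl

lemma dehCharsB_eq (cs : List Char) : dehCharsB cs = gRec ' ' cs := by
  have hsl : PySem.Chars.slice cs (some 1) none = cs.drop 1 := by simp [pysem]
  rw [dehCharsB, hsl, zipg_eq]

-- ===== VERDICT (by name: the statement is the Claim_ definition above) =====
theorem dehyphenate_py_spec : Claim_equal_dehyphenate_py := by
  intro text _
  unfold Spec_dehyphenate_py dehyphenate_py dehyphenate_py_alt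
  rw [PySem.List.foldl_append_singleton_eq_map, List.nil_append, dehCharsB_eq,
    split₀_eq_mySplit, split₀_eq_mySplit]
  exact congrArg String.ofList
    ((List.map_congr_left (fun w _ => dehWordA_eq w)).symm ▸ core text.toList)
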